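-- pv_equiv track=rewrite | github.com/darynella2001/LFPC | lab3/test.py | eliminate_inaccessible_symbols
-- ===== SOURCE A (Python) =====
-- def eliminate_inaccessible_symbols(map):
--     prod = map.copy()
--     accessed_keys = set()
--
--     for key, value in prod.items():
--         for i in value:
--             for symbol in i:
--                 # find the accessed nonterminals
--                 if symbol in prod:
--                     accessed_keys.add(symbol)
--
--     # find and delete the inaccessible symbols
--     for key in list(prod):
--         if key not in accessed_keys:
--             del prod[key]
--     return prod
-- ===== SOURCE B (Python) =====
-- def eliminate_inaccessible_symbols(map):
--     # No accessed-symbol set at all: keep a key iff a full scan of every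
--     # right-hand side of the grammar finds a symbol equal to it.
--     # (alt is a LIST, so `key in alt` is element equality, not substring.)
--     return {key: value
--             for key, value in map.items()
--             if any(key in alt for val in map.values() for alt in val)}
-- ===== Notes on version B (the rewrite author's own statement) =====
-- stated objective: alternative
-- what changed: A builds a set of accessed nonterminals in one pass and then deletes unlisted keys from a dict copy; B keeps no set at all and instead decides each key independently by rescanning every right-hand side of the whole grammar for a symbol equal to that key (a quadratic per-key scan instead of a prebuilt set index).
import Mathlib
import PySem

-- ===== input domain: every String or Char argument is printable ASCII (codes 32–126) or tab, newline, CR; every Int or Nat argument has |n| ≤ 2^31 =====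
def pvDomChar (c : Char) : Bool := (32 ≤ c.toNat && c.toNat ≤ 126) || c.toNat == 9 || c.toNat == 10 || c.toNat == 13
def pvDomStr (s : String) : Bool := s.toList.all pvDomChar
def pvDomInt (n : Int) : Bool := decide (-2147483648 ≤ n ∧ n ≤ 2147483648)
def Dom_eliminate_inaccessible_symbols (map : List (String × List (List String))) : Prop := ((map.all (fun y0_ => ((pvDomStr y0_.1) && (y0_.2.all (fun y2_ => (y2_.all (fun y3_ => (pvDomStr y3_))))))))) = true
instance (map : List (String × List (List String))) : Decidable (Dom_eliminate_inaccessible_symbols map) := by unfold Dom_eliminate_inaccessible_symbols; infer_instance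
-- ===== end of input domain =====

-- B keeps no accessed-symbol set: it decides each key by rescanning every RHS of the
-- grammar for an equal symbol (objective: alternative). A copies the dict before
-- mutating, so the caller's argument is untouched; equivalence is about the return value.

-- ===== PORT A =====
-- prod = map.copy(); accessed_keys built by the triple loop; then keys not in the set are deleted.
def eliminate_inaccessible_symbols (map : List (String × List (List String))) : List (String × List (List String)) :=
  let prod := map
  let accessed_keys : PySem.Set String :=
    prod.foldl (fun acc kv =>
      kv.2.foldl (fun acc i =>
        i.foldl (fun acc symbol =>
          -- 'symbol in prod' : dict key membership
          if prod.any (fun p => p.1 == symbol) then PySem.Set.add acc symbol else acc)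
        acc)
      acc)
    PySem.Set.empty
  -- for key in list(prod): if key not in accessed_keys: del prod[key]  — keys unique, order kept
  prod.filter (fun kv => PySem.Set.contains accessed_keys kv.1)

-- ===== PORT B =====
-- dict comprehension: keep (key, value) iff any(key in alt for val in map.values() for alt in val); alt is a list, so "in" is element equality
def eliminate_inaccessible_symbols_alt (map : List (String × List (List String))) : List (String × List (List String)) :=
  map.filter (fun kv =>
    map.any (fun val => val.2.any (fun alt => alt.any (fun symbol => kv.1 == symbol))))

-- ===== PRECONDITION & SPEC =====
def Spec_eliminate_inaccessible_symbols (map : List (String × List (List String))) (out : List (String × List (List String))) : Prop := out = eliminate_inaccessible_symbols_alt map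
instance (map : List (String × List (List String))) (out : List (String × List (List String))) : Decidable (Spec_eliminate_inaccessible_symbols map out) := by unfold Spec_eliminate_inaccessible_symbols; infer_instance

-- ===== CLAIM =====
def Claim_equal_eliminate_inaccessible_symbols : Prop := ∀ (map : List (String × List (List String))), Dom_eliminate_inaccessible_symbols map → Spec_eliminate_inaccessible_symbols map (eliminate_inaccessible_symbols map)

-- ===== LEMMAS AND PROOFS =====

theorem pv_contains_iff {s : PySem.Set String} {x : String} :
    PySem.Set.contains s x = true ↔ x ∈ s := by
  simp [PySem.Set.contains]

-- membership in the innermost fold (one alternative)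
theorem pv_mem_inner (map : List (String × List (List String))) (i : List String)
    (acc : PySem.Set String) (s : String) :
    s ∈ i.foldl (fun acc symbol =>
        if map.any (fun p => p.1 == symbol) then PySem.Set.add acc symbol else acc) acc ↔
      s ∈ acc ∨ (map.any (fun p => p.1 == s) = true ∧ s ∈ i) := by
  induction i generalizing acc with
  | nil => simp
  | cons x xs ih =>
    simp only [List.foldl_cons, ih]
    by_cases h : map.any (fun p => p.1 == x) = true
    · simp only [h, if_true, PySem.Set.mem_add]
      constructor
      · rintro ((hs | rfl) | h2)
        · exact Or.inl hs
        · exact Or.inr ⟨h, List.mem_cons_self ..⟩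
        · exact Or.inr ⟨h2.1, List.mem_cons_of_mem _ h2.2⟩
      · rintro (hs | ⟨hm, hx⟩)
        · exact Or.inl (Or.inl hs)
        · rcases List.mem_cons.mp hx with rfl | hx
          · exact Or.inl (Or.inr rfl)
          · exact Or.inr ⟨hm, hx⟩
    · simp only [h, Bool.false_eq_true, if_false]
      constructor
      · rintro (hs | h2)
        · exact Or.inl hs
        · exact Or.inr ⟨h2.1, List.mem_cons_of_mem _ h2.2⟩
      · rintro (hs | ⟨hm, hx⟩)
        · exact Or.inl hs
        · rcases List.mem_cons.mp hx with rfl | hx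
          · exact absurd hm h
          · exact Or.inr ⟨hm, hx⟩

-- membership in the middle fold (one production's list of alternatives)
theorem pv_mem_mid (map : List (String × List (List String))) (v : List (List String))
    (acc : PySem.Set String) (s : String) :
    s ∈ v.foldl (fun acc i =>
        i.foldl (fun acc symbol =>
          if map.any (fun p => p.1 == symbol) then PySem.Set.add acc symbol else acc) acc) acc ↔
      s ∈ acc ∨ (map.any (fun p => p.1 == s) = true ∧ ∃ i ∈ v, s ∈ i) := by
  induction v generalizing acc with
  | nil => simp
  | cons a as ih =>
    simp only [List.foldl_cons, ih, pv_mem_inner]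
    constructor
    · rintro ((hs | ⟨hm, hi⟩) | ⟨hm, i, hiv, hsi⟩)
      · exact Or.inl hs
      · exact Or.inr ⟨hm, a, List.mem_cons_self .., hi⟩
      · exact Or.inr ⟨hm, i, List.mem_cons_of_mem _ hiv, hsi⟩
    · rintro (hs | ⟨hm, i, hiv, hsi⟩)
      · exact Or.inl (Or.inl hs)
      · rcases List.mem_cons.mp hiv with rfl | hiv
        · exact Or.inl (Or.inr ⟨hm, hsi⟩)
        · exact Or.inr ⟨hm, i, hiv, hsi⟩

-- membership in the accessed_keys set built by the outer fold
theorem pv_mem_outer (map : List (String × List (List String))) (l : List (String × List (List String)))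
    (acc : PySem.Set String) (s : String) :
    s ∈ l.foldl (fun acc kv =>
        kv.2.foldl (fun acc i =>
          i.foldl (fun acc symbol =>
            if map.any (fun p => p.1 == symbol) then PySem.Set.add acc symbol else acc) acc) acc) acc ↔
      s ∈ acc ∨ (map.any (fun p => p.1 == s) = true ∧ ∃ kv ∈ l, ∃ i ∈ kv.2, s ∈ i) := by
  induction l generalizing acc with
  | nil => simp
  | cons a as ih =>
    simp only [List.foldl_cons, ih, pv_mem_mid]
    constructor
    · rintro ((hs | ⟨hm, hi⟩) | ⟨hm, kv, hkv, hi⟩)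
      · exact Or.inl hs
      · exact Or.inr ⟨hm, a, List.mem_cons_self .., hi⟩
      · exact Or.inr ⟨hm, kv, List.mem_cons_of_mem _ hkv, hi⟩
    · rintro (hs | ⟨hm, kv, hkv, hi⟩)
      · exact Or.inl (Or.inl hs)
      · rcases List.mem_cons.mp hkv with rfl | hkv
        · exact Or.inl (Or.inr ⟨hm, hi⟩)
        · exact Or.inr ⟨hm, kv, hkv, hi⟩

-- ===== VERDICT =====
theorem eliminate_inaccessible_symbols_spec : Claim_equal_eliminate_inaccessible_symbols := by
  intro map _
  show eliminate_inaccessible_symbols map = eliminate_inaccessible_symbols_alt map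
  unfold eliminate_inaccessible_symbols eliminate_inaccessible_symbols_alt
  apply List.filter_congr
  intro kv hkv
  have hkey : map.any (fun p => p.1 == kv.1) = true :=
    List.any_eq_true.mpr ⟨kv, hkv, beq_self_eq_true _⟩
  have hB : (map.any (fun val => val.2.any (fun alt => alt.any (fun symbol => kv.1 == symbol)))) = true ↔
      ∃ p ∈ map, ∃ i ∈ p.2, kv.1 ∈ i := by
    simp only [List.any_eq_true, beq_iff_eq]
    constructor
    · rintro ⟨p, hp, i, hi, s, hs, rfl⟩
      exact ⟨p, hp, i, hi, hs⟩
    · rintro ⟨p, hp, i, hi, hs⟩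
      exact ⟨p, hp, i, hi, kv.1, hs, rfl⟩
  by_cases h : ∃ p ∈ map, ∃ i ∈ p.2, kv.1 ∈ i
  · have h1 := pv_contains_iff.mpr ((pv_mem_outer map map PySem.Set.empty kv.1).mpr (Or.inr ⟨hkey, h⟩))
    rw [h1, hB.mpr h]
  · have h1 : PySem.Set.contains
        (map.foldl (fun acc kv =>
          kv.2.foldl (fun acc i =>
            i.foldl (fun acc symbol =>
              if map.any (fun p => p.1 == symbol) then PySem.Set.add acc symbol else acc) acc) acc)
          PySem.Set.empty) kv.1 = false := by
      rw [Bool.eq_false_iff]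
      intro hc
      rcases (pv_mem_outer map map PySem.Set.empty kv.1).mp (pv_contains_iff.mp hc) with hmem | ⟨_, hx⟩
      · simp [PySem.Set.empty] at hmem
      · exact h hx
    have h2 : (map.any (fun val => val.2.any (fun alt => alt.any (fun symbol => kv.1 == symbol)))) = false := by
      rw [Bool.eq_false_iff]; intro hc; exact h (hB.mp hc)
    rw [h1, h2]
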